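-- pv_equiv track=rewrite | github.com/martinuy90/lumi-broker-crm | parse_pdf.py | deduplicate_results
-- ===== SOURCE A (Python) =====
-- def deduplicate_results(results):
--     by_cpf = {}
--     no_cpf = []
--     for r in results:
--         cpf = r.get("cpf_raw")
--         if not cpf:
--             no_cpf.append(r)
--             continue
--         if cpf not in by_cpf:
--             by_cpf[cpf] = r
--         else:
--             existing = by_cpf[cpf]
--             eid = int(existing.get("consultation_id", "0"))
--             nid = int(r.get("consultation_id", "0"))
--             if nid > eid: by_cpf[cpf] = r
--     return list(by_cpf.values()) + no_cpf
-- ===== SOURCE B (Python) =====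
-- def deduplicate_results(results):
--     no_cpf = [r for r in results if not r.get("cpf_raw")]
--     rest = [r for r in results if r.get("cpf_raw")]
--     out = []
--     while rest:
--         c = rest[0].get("cpf_raw")
--         group = [r for r in rest if r.get("cpf_raw") == c]
--         rest = [r for r in rest if r.get("cpf_raw") != c]
--         out.append(group[0] if len(group) == 1 else
--                    max(group, key=lambda r: int(r.get("consultation_id", "0"))))
--     return out + no_cpf
-- ===== Notes on version B (the rewrite author's own statement) =====
-- stated objective: alternative
-- what changed: B replaces A's single forward pass with an inline running-best dict by a group-by-extraction recursion: it splits off the no-CPF records with two filters, then repeatedly takes the first remaining record's cpf, reduces that whole group at once with max(key=int(consultation_id)) (group[0] for a singleton group) and recurses on the records with other cpfs — no dict at all.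
import Mathlib
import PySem

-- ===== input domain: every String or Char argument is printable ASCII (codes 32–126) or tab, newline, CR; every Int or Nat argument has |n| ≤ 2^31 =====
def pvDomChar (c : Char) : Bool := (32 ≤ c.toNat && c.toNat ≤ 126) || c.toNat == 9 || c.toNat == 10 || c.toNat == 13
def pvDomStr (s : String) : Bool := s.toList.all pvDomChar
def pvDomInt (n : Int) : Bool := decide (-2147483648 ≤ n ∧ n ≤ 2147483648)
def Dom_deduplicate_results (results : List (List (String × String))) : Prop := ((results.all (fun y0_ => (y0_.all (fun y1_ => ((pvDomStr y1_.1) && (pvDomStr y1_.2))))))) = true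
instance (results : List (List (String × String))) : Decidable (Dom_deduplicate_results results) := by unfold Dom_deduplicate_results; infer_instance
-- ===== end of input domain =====

-- B deduplicates by repeated extraction: it splits off the no-CPF records, then repeatedly takes
-- the first remaining record's cpf, selects that whole group with max(key=consultation_id) and
-- recurses on the records with other cpfs — no dict at all (objective: alternative decomposition).


-- shared helpers: r.get(key) on a record-dict, and int(r.get("consultation_id", "0"))
-- (the .getD 0 arm is unreachable inside Pre_, where the string is int-parseable)
def pvGet (r : List (String × String)) (k : String) : Option String :=
  (PySem.Dict.mk r).get? k

def pvCid (r : List (String × String)) : Int :=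
  (PySem.Int.ofStr? ((pvGet r "consultation_id").getD "0")).getD 0

-- ===== PORT A =====
-- one pass; dict cpf → current best record, updated inline on strict '>'
def deduplicate_results (results : List (List (String × String))) : List (List (String × String)) :=
  let st := results.foldl
    (fun (st : PySem.Dict String (List (String × String)) × List (List (String × String))) r =>
      match pvGet r "cpf_raw" with
      | none => (st.1, st.2 ++ [r])
      | some c =>
        if c = "" then (st.1, st.2 ++ [r])
        else
          match st.1.get? c with
          | none => (st.1.insert c r, st.2)
          | some existing =>
            let eid := pvCid existing
            let nid := pvCid r
            if nid > eid then (st.1.insert c r, st.2) else st)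
    (PySem.Dict.empty, [])
  st.1.values ++ st.2

-- ===== PORT B =====
-- the extraction loop: take the first record's cpf, reduce its whole group with max(key=cid)
-- (group[0] when the group is a singleton), drop the group and continue on the rest
def pvDedupRec (rest : List (List (String × String))) : List (List (String × String)) :=
  match rest with
  | [] => []
  | head :: t =>
    let c := pvGet head "cpf_raw"
    let group := (head :: t).filter (fun r => pvGet r "cpf_raw" == c)
    let rest' := (head :: t).filter (fun r => pvGet r "cpf_raw" != c)
    (if group.length = 1 then group.headD []
     else (PySem.List.max? group pvCid).getD []) :: pvDedupRec rest'
termination_by rest.length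
decreasing_by
  simp only [List.filter_cons, bne_self_eq_false, Bool.false_eq_true, if_false, List.length_cons]
  exact Nat.lt_succ_of_le (List.length_filter_le _ _)

def deduplicate_results_alt (results : List (List (String × String))) : List (List (String × String)) :=
  let no_cpf := results.filter (fun r =>
    match pvGet r "cpf_raw" with | none => true | some c => c == "")
  let rest := results.filter (fun r =>
    match pvGet r "cpf_raw" with | none => false | some c => c != "")
  pvDedupRec rest ++ no_cpf

-- ===== PRECONDITION & SPEC =====
-- Pre_ excludes exactly the inputs on which int(consultation_id) raises ValueError in both
-- programs: a record whose truthy cpf_raw is shared by another record but whose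
-- consultation_id (default "0") is not int-parseable.
def Pre_deduplicate_results (results : List (List (String × String))) : Prop :=
  (results.all (fun r =>
    match pvGet r "cpf_raw" with
    | none => true
    | some c =>
      c == "" ||
      decide (results.countP (fun s => pvGet s "cpf_raw" == some c) ≤ 1) ||
      (PySem.Int.ofStr? ((pvGet r "consultation_id").getD "0")).isSome)) = true
instance (results : List (List (String × String))) : Decidable (Pre_deduplicate_results results) := by unfold Pre_deduplicate_results; infer_instance

def pvWitness_deduplicate_results : (List (List (String × String))) :=
  [[("cpf_raw", "11"), ("consultation_id", "2")],
   [("cpf_raw", "11"), ("consultation_id", "3")],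
   [("name", "x")]]

def Spec_deduplicate_results (results : List (List (String × String))) (out : List (List (String × String))) : Prop := out = deduplicate_results_alt results
instance (results : List (List (String × String))) (out : List (List (String × String))) : Decidable (Spec_deduplicate_results results out) := by unfold Spec_deduplicate_results; infer_instance

-- ===== CLAIM (what is proved, stated in full; the proofs are below) =====
def Claim_equal_deduplicate_results : Prop := ∀ (results : List (List (String × String))), Dom_deduplicate_results results → Pre_deduplicate_results results → Spec_deduplicate_results results (deduplicate_results results)

-- ===== LEMMAS AND PROOFS =====

-- reduce a group to its first record of maximal pvCid
def pvRed (g : List (List (String × String))) : List (String × String) :=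
  (PySem.List.max? g pvCid).getD []

def pvRed' (p : String × List (List (String × String))) : String × List (String × String) :=
  (p.1, pvRed p.2)

theorem get?_mk_map (l : List (String × List (List (String × String)))) (c : String) :
    (PySem.Dict.mk (l.map pvRed')).get? c = ((PySem.Dict.mk l).get? c).map pvRed := by
  induction l with
  | nil => rfl
  | cons p t ih =>
    obtain ⟨k, v⟩ := p
    simp only [List.map_cons, pvRed', PySem.Dict.get?_mk_cons]
    by_cases h : (k == c) = true
    · simp [h]
    · simp [h, ih]

theorem max?_append_singleton (g : List (List (String × String))) (r : List (String × String)) :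
    PySem.List.max? (g ++ [r]) pvCid =
      match PySem.List.max? g pvCid with
      | none => some r
      | some m => if pvCid m < pvCid r then some r else some m := by
  unfold PySem.List.max?
  rw [List.foldl_append]
  simp only [List.foldl_cons, List.foldl_nil]
  split <;> rename_i heq <;> rw [heq]

theorem pvRed_append_of_ne_nil (g : List (List (String × String))) (r : List (String × String))
    (hg : g ≠ []) :
    pvRed (g ++ [r]) = if pvCid (pvRed g) < pvCid r then r else pvRed g := by
  obtain ⟨m, hm⟩ : ∃ m, PySem.List.max? g pvCid = some m := by
    cases h : PySem.List.max? g pvCid with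
    | none => exact absurd ((PySem.List.max?_eq_none_iff g pvCid).mp h) hg
    | some m => exact ⟨m, rfl⟩
  have hred : pvRed g = m := by simp [pvRed, hm]
  simp only [pvRed, max?_append_singleton, hm, Option.getD_some]
  split_ifs <;> rfl

-- the A-fold/group-fold invariant: A's dict is the pvRed'-image of the grouping dict
theorem loop_invariant (results : List (List (String × String)))
    (l : List (String × List (List (String × String))))
    (n : List (List (String × String)))
    (hnd : (l.map Prod.fst).Nodup)
    (hne : ∀ p ∈ l, p.2 ≠ []) :
    (results.foldl
      (fun (st : PySem.Dict String (List (String × String)) × List (List (String × String))) r =>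
        match pvGet r "cpf_raw" with
        | none => (st.1, st.2 ++ [r])
        | some c =>
          if c = "" then (st.1, st.2 ++ [r])
          else
            match st.1.get? c with
            | none => (st.1.insert c r, st.2)
            | some existing =>
              let eid := pvCid existing
              let nid := pvCid r
              if nid > eid then (st.1.insert c r, st.2) else st)
      (PySem.Dict.mk (l.map pvRed'), n)) =
    (fun (st : PySem.Dict String (List (List (String × String))) × List (List (String × String))) =>
      (PySem.Dict.mk (st.1.items.map pvRed'), st.2))
    (results.foldl
      (fun (st : PySem.Dict String (List (List (String × String))) × List (List (String × String))) r =>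
        match pvGet r "cpf_raw" with
        | none => (st.1, st.2 ++ [r])
        | some c =>
          if c = "" then (st.1, st.2 ++ [r])
          else (st.1.modify c [] (· ++ [r]), st.2))
      (PySem.Dict.mk l, n)) := by
  induction results generalizing l n with
  | nil => rfl
  | cons r rest ih =>
    simp only [List.foldl_cons]
    cases hcpf : pvGet r "cpf_raw" with
    | none => exact ih l (n ++ [r]) hnd hne
    | some c =>
      by_cases hce : c = ""
      · simp only [hce]
        exact ih l (n ++ [r]) hnd hne
      · simp only [if_neg hce]
        cases hget : (PySem.Dict.mk l).get? c with
        | none =>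
          have hc1 : (PySem.Dict.mk (l.map pvRed')).get? c = none := by
            rw [get?_mk_map, hget]; rfl
          have hco : (PySem.Dict.mk l).contains c = false := by
            rw [PySem.Dict.contains_eq_isSome_get?, hget]; rfl
          have hco1 : (PySem.Dict.mk (l.map pvRed')).contains c = false := by
            rw [PySem.Dict.contains_eq_isSome_get?, hc1]; rfl
          simp only [hc1]
          have hmod : (PySem.Dict.mk l).modify c [] (· ++ [r]) = PySem.Dict.mk (l ++ [(c, [r])]) := by
            simp only [PySem.Dict.modify, PySem.Dict.getD_eq_get?_getD, hget, Option.getD_none]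
            apply PySem.Dict.ext
            rw [PySem.Dict.items_insert_of_not_contains _ _ hco]
            simp
          have hins : (PySem.Dict.mk (l.map pvRed')).insert c r
              = PySem.Dict.mk ((l ++ [(c, [r])]).map pvRed') := by
            apply PySem.Dict.ext
            rw [PySem.Dict.items_insert_of_not_contains _ _ hco1]
            simp [pvRed', pvRed, PySem.List.max?]
          rw [hmod, hins]
          refine ih (l ++ [(c, [r])]) n ?_ ?_
          · simp only [List.map_append, List.map_cons, List.map_nil]
            rw [List.nodup_append]
            refine ⟨hnd, by simp, ?_⟩
            intro x hx y hy
            rw [List.mem_singleton] at hy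
            subst hy
            intro hxc
            subst hxc
            obtain ⟨p, hp, hpc⟩ := List.mem_map.mp hx
            have := PySem.Dict.get?_of_mem_items (d := PySem.Dict.mk l) (k := p.1) (v := p.2)
              (by simpa using hp) (by simpa [PySem.Dict.keys] using hnd)
            rw [hpc] at this
            rw [hget] at this; cases this
          · intro p hp
            rcases List.mem_append.mp hp with h | h
            · exact hne p h
            · simp only [List.mem_singleton] at h; subst h; simp
        | some g =>
          have hgne : g ≠ [] := by
            have := PySem.Dict.mem_items_of_get?_eq_some (d := PySem.Dict.mk l) hget
            exact hne _ (by simpa using this)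
          have hc1 : (PySem.Dict.mk (l.map pvRed')).get? c = some (pvRed g) := by
            rw [get?_mk_map, hget]; rfl
          have hco : (PySem.Dict.mk l).contains c = true := by
            rw [PySem.Dict.contains_eq_isSome_get?, hget]; rfl
          have hco1 : (PySem.Dict.mk (l.map pvRed')).contains c = true := by
            rw [PySem.Dict.contains_eq_isSome_get?, hc1]; rfl
          simp only [hc1]
          have huniq : ∀ p ∈ l, p.1 = c → p.2 = g := by
            intro p hp hpc
            have := PySem.Dict.get?_of_mem_items (d := PySem.Dict.mk l) (k := p.1) (v := p.2)
              (by simpa using hp) (by simpa [PySem.Dict.keys] using hnd)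
            rw [hpc, hget] at this
            exact (Option.some.injEq _ _).mp this.symm
          set l' := l.map (fun p => if p.1 == c then (c, g ++ [r]) else p) with hl'
          have hmod : (PySem.Dict.mk l).modify c [] (· ++ [r]) = PySem.Dict.mk l' := by
            simp only [PySem.Dict.modify, PySem.Dict.getD_eq_get?_getD, hget, Option.getD_some]
            apply PySem.Dict.ext
            rw [PySem.Dict.items_insert_of_contains _ _ hco]
          have hnd' : (l'.map Prod.fst).Nodup := by
            have : l'.map Prod.fst = l.map Prod.fst := by
              simp only [hl', List.map_map]
              apply List.map_congr_left
              intro p _; by_cases h : p.1 = c <;> simp [h]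
            rw [this]; exact hnd
          have hne' : ∀ p ∈ l', p.2 ≠ [] := by
            intro p hp
            obtain ⟨q, hq, hqp⟩ := List.mem_map.mp hp
            by_cases h : q.1 = c
            · simp only [h, BEq.rfl, if_pos] at hqp
              subst hqp; simp
            · simp only [beq_iff_eq, h, if_false] at hqp
              subst hqp; exact hne q hq
          have hmapred : l'.map pvRed' =
              (l.map pvRed').map (fun p => if p.1 == c then (c, pvRed (g ++ [r])) else p) := by
            simp only [hl', List.map_map]
            apply List.map_congr_left
            intro p hp
            by_cases h : p.1 = c
            · have hpg := huniq p hp h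
              simp [h, pvRed', hpg]
            · simp [pvRed', h]
          rw [hmod]
          by_cases hlt : pvCid (pvRed g) < pvCid r
          · simp only [gt_iff_lt, if_pos hlt]
            have hins : (PySem.Dict.mk (l.map pvRed')).insert c r = PySem.Dict.mk (l'.map pvRed') := by
              apply PySem.Dict.ext
              rw [PySem.Dict.items_insert_of_contains _ _ hco1]
              rw [hmapred, pvRed_append_of_ne_nil g r hgne, if_pos hlt]
            rw [hins]
            exact ih l' n hnd' hne'
          · simp only [gt_iff_lt, if_neg hlt]
            have hsame : (l.map pvRed') = l'.map pvRed' := by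
              rw [hmapred, pvRed_append_of_ne_nil g r hgne, if_neg hlt, List.map_map]
              symm
              apply List.map_congr_left
              intro p hp
              by_cases h : p.1 = c
              · simp [Function.comp, pvRed', h, huniq p hp h]
              · simp [Function.comp, pvRed', h]
            rw [hsame]
            exact ih l' n hnd' hne'

-- the grouping fold, dict component only, and the list of falsy-cpf records
def gstep1 (d : PySem.Dict String (List (List (String × String))))
    (r : List (String × String)) : PySem.Dict String (List (List (String × String))) :=
  match pvGet r "cpf_raw" with
  | none => d
  | some c => if c = "" then d else d.modify c [] (· ++ [r])

def pvFalsy (r : List (String × String)) : Bool :=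
  match pvGet r "cpf_raw" with | none => true | some c => c == ""

theorem fold_split (results : List (List (String × String)))
    (d : PySem.Dict String (List (List (String × String))))
    (n : List (List (String × String))) :
    (results.foldl
      (fun (st : PySem.Dict String (List (List (String × String))) × List (List (String × String))) r =>
        match pvGet r "cpf_raw" with
        | none => (st.1, st.2 ++ [r])
        | some c =>
          if c = "" then (st.1, st.2 ++ [r])
          else (st.1.modify c [] (· ++ [r]), st.2))
      (d, n)) = (results.foldl gstep1 d, n ++ results.filter pvFalsy) := by
  induction results generalizing d n with
  | nil => simp
  | cons r t ih =>
    simp only [List.foldl_cons, List.filter_cons]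
    cases hcpf : pvGet r "cpf_raw" with
    | none =>
      simp only [gstep1, pvFalsy, hcpf]
      rw [ih]; simp
    | some c =>
      by_cases hce : c = ""
      · subst hce
        simp only [gstep1, pvFalsy, hcpf]
        rw [ih]; simp
      · simp only [gstep1, pvFalsy, hcpf, if_neg hce]
        rw [ih]
        have : (c == "") = false := beq_eq_false_iff_ne.mpr hce
        simp [this]

-- the canonical group-by-extraction of the truthy-cpf records (same recursion as pvDedupRec,
-- but keeping the key and the whole group)
def gb (w : List (List (String × String))) : List (String × List (List (String × String))) :=
  match w with
  | [] => []
  | r :: t =>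
    match pvGet r "cpf_raw" with
    | none => gb t
    | some c =>
      if c = "" then gb t
      else (c, (r :: t).filter (fun q => pvGet q "cpf_raw" == some c)) ::
        gb (t.filter (fun q => !(pvGet q "cpf_raw" == some c)))
termination_by w.length
decreasing_by
  all_goals refine lt_of_le_of_lt ?_ (show t.length < (r :: t).length by simp)
  all_goals first
    | exact le_refl _
    | (rw [List.length_unattach]; exact le_trans (List.length_filter_le _ _) (by simp))

theorem gb_nil : gb [] = [] := by rw [gb]

theorem gb_cons (r : List (String × String)) (t : List (List (String × String))) :
    gb (r :: t) =
      match pvGet r "cpf_raw" with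
      | none => gb t
      | some c =>
        if c = "" then gb t
        else (c, (r :: t).filter (fun q => pvGet q "cpf_raw" == some c)) ::
          gb (t.filter (fun q => !(pvGet q "cpf_raw" == some c))) := by
  rw [gb]

theorem gb_ne_nil_aux (n : Nat) :
    ∀ (w : List (List (String × String))), w.length ≤ n → ∀ p ∈ gb w, p.2 ≠ [] := by
  induction n with
  | zero =>
    intro w hw p hp
    rw [List.eq_nil_of_length_eq_zero (Nat.le_zero.mp hw), gb_nil] at hp
    cases hp
  | succ n ih =>
    intro w hw p hp
    cases w with
    | nil => rw [gb_nil] at hp; cases hp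
    | cons r t =>
      rw [gb_cons] at hp
      simp only [List.length_cons, Nat.succ_le_succ_iff] at hw
      cases hcpf : pvGet r "cpf_raw" with
      | none =>
        simp only [hcpf] at hp
        exact ih t hw p hp
      | some c =>
        simp only [hcpf] at hp
        by_cases hce : c = ""
        · rw [if_pos hce] at hp
          exact ih t hw p hp
        · rw [if_neg hce] at hp
          rcases List.mem_cons.mp hp with rfl | hp
          · simp only [List.filter_cons, hcpf, BEq.rfl, if_pos]
            simp
          · exact ih (t.filter _) (le_trans (List.length_filter_le _ _) hw) p hp

theorem gb_ne_nil (w : List (List (String × String))) :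
    ∀ p ∈ gb w, p.2 ≠ [] := gb_ne_nil_aux w.length w (le_refl _)

-- (pvGet q == some c) read through getD, for c ≠ ""
theorem cpf_match_eq (c : String) (hce : c ≠ "") (q : List (String × String)) :
    (pvGet q "cpf_raw" == some c) = (((pvGet q "cpf_raw").getD "") == c) := by
  cases hq : pvGet q "cpf_raw" with
  | none =>
    have : ("" == c) = false := beq_eq_false_iff_ne.mpr (fun h => hce h.symm)
    simp [this]
  | some s => simp

-- items of the grouping fold, characterised by gb
theorem items_gfold (w : List (List (String × String))) :
    ∀ (l : List (String × List (List (String × String)))),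
    (l.map Prod.fst).Nodup → (∀ p ∈ l, p.1 ≠ "") →
    (w.foldl gstep1 (PySem.Dict.mk l)).items
      = l.map (fun p => (p.1, p.2 ++ w.filter (fun q => pvGet q "cpf_raw" == some p.1)))
        ++ gb (w.filter (fun q => !((l.map Prod.fst).contains ((pvGet q "cpf_raw").getD "")))) := by
  induction w with
  | nil =>
    intro l _ _
    simp [gb_nil]
  | cons r t ih =>
    intro l hnd hne
    have hnm : "" ∉ l.map Prod.fst := by
      intro hmem
      obtain ⟨p, hp, hp1⟩ := List.mem_map.mp hmem
      exact hne p hp hp1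
    simp only [List.foldl_cons]
    cases hcpf : pvGet r "cpf_raw" with
    | none =>
      have hstep : gstep1 (PySem.Dict.mk l) r = PySem.Dict.mk l := by
        simp [gstep1, hcpf]
      rw [hstep, ih l hnd hne]
      congr 1
      · apply List.map_congr_left
        intro p hp
        have hf : (pvGet r "cpf_raw" == some p.1) = false := by rw [hcpf]; rfl
        rw [List.filter_cons, hf]
        simp
      · have hg : (!((l.map Prod.fst).contains ((pvGet r "cpf_raw").getD ""))) = true := by
          rw [hcpf]; simp [hnm]
        rw [List.filter_cons, hg]
        simp only [if_pos]
        rw [gb_cons, hcpf]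
    | some c =>
      by_cases hce : c = ""
      · subst hce
        have hstep : gstep1 (PySem.Dict.mk l) r = PySem.Dict.mk l := by
          simp [gstep1, hcpf]
        rw [hstep, ih l hnd hne]
        congr 1
        · apply List.map_congr_left
          intro p hp
          have hf : (pvGet r "cpf_raw" == some p.1) = false := by
            rw [hcpf]
            have : ("" == p.1) = false := beq_eq_false_iff_ne.mpr (fun h => hne p hp h.symm)
            simpa using this
          rw [List.filter_cons, hf]
          simp
        · have hg : (!((l.map Prod.fst).contains ((pvGet r "cpf_raw").getD ""))) = true := by
            rw [hcpf]; simp [hnm]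
          rw [List.filter_cons, hg]
          simp only [if_pos]
          rw [gb_cons, hcpf]
          simp
      · -- truthy cpf c
        have hkeysmk : (PySem.Dict.mk l).keys = l.map Prod.fst := rfl
        by_cases hc : c ∈ l.map Prod.fst
        · -- existing key
          obtain ⟨g, hget⟩ : ∃ g, (PySem.Dict.mk l).get? c = some g := by
            have hco : (PySem.Dict.mk l).contains c = true := by
              rw [PySem.Dict.contains_eq_decide_mem_keys, hkeysmk]
              simpa using hc
            rw [PySem.Dict.contains_eq_isSome_get?] at hco
            exact Option.isSome_iff_exists.mp hco
          have hco : (PySem.Dict.mk l).contains c = true := by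
            rw [PySem.Dict.contains_eq_isSome_get?, hget]; rfl
          have huniq : ∀ p ∈ l, p.1 = c → p.2 = g := by
            intro p hp hpc
            have := PySem.Dict.get?_of_mem_items (d := PySem.Dict.mk l) (k := p.1) (v := p.2)
              (by simpa using hp) (by simpa [PySem.Dict.keys] using hnd)
            rw [hpc, hget] at this
            exact (Option.some.injEq _ _).mp this.symm
          set updf : (String × List (List (String × String))) → (String × List (List (String × String))) :=
            fun p => if p.1 == c then (c, g ++ [r]) else p with hupdf
          have hstep : gstep1 (PySem.Dict.mk l) r = PySem.Dict.mk (l.map updf) := by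
            simp only [gstep1, hcpf, if_neg hce]
            simp only [PySem.Dict.modify, PySem.Dict.getD_eq_get?_getD, hget, Option.getD_some]
            apply PySem.Dict.ext
            rw [PySem.Dict.items_insert_of_contains _ _ hco]
          have hkeys : (l.map updf).map Prod.fst = l.map Prod.fst := by
            rw [List.map_map]
            apply List.map_congr_left
            intro p _
            by_cases h : p.1 = c <;> simp [hupdf, h]
          have hnd' : ((l.map updf).map Prod.fst).Nodup := by rw [hkeys]; exact hnd
          have hne' : ∀ p ∈ l.map updf, p.1 ≠ "" := by
            intro p hp
            obtain ⟨q, hq, hqp⟩ := List.mem_map.mp hp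
            by_cases h : q.1 = c
            · simp only [hupdf, h, BEq.rfl, if_pos] at hqp
              rw [← hqp]
              exact hce
            · simp only [hupdf, beq_iff_eq, h, if_false] at hqp
              rw [← hqp]
              exact hne q hq
          rw [hstep, ih (l.map updf) hnd' hne']
          congr 1
          · rw [List.map_map]
            apply List.map_congr_left
            intro p hp
            by_cases h : p.1 = c
            · have hpg : p.2 = g := huniq p hp h
              have htr : (pvGet r "cpf_raw" == some p.1) = true := by
                rw [hcpf, h]; simp
              rw [List.filter_cons, htr]
              simp only [Function.comp_apply, hupdf, h, BEq.rfl, if_pos]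
              simp [hpg, List.append_assoc]
            · have hf : (pvGet r "cpf_raw" == some p.1) = false := by
                rw [hcpf]
                simpa using fun hh => h hh.symm
              rw [List.filter_cons, hf]
              simp [hupdf, h]
          · rw [hkeys]
            have hdrop : (!((l.map Prod.fst).contains ((pvGet r "cpf_raw").getD ""))) = false := by
              rw [hcpf]
              simpa using hc
            rw [List.filter_cons, hdrop]
            simp
        · -- fresh key
          have hget : (PySem.Dict.mk l).get? c = none := by
            rw [PySem.Dict.get?_eq_none_iff_not_mem_keys, hkeysmk]
            exact hc
          have hco : (PySem.Dict.mk l).contains c = false := by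
            rw [PySem.Dict.contains_eq_isSome_get?, hget]; rfl
          have hstep : gstep1 (PySem.Dict.mk l) r = PySem.Dict.mk (l ++ [(c, [r])]) := by
            simp only [gstep1, hcpf, if_neg hce]
            simp only [PySem.Dict.modify, PySem.Dict.getD_eq_get?_getD, hget, Option.getD_none]
            apply PySem.Dict.ext
            rw [PySem.Dict.items_insert_of_not_contains _ _ hco]
            simp
          have hnd' : ((l ++ [(c, [r])]).map Prod.fst).Nodup := by
            simp only [List.map_append, List.map_cons, List.map_nil]
            rw [List.nodup_append]
            refine ⟨hnd, by simp, ?_⟩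
            intro x hx y hy
            rw [List.mem_singleton] at hy
            subst hy
            intro hxc
            subst hxc
            exact hc hx
          have hne' : ∀ p ∈ l ++ [(c, [r])], p.1 ≠ "" := by
            intro p hp
            rcases List.mem_append.mp hp with h | h
            · exact hne p h
            · simp only [List.mem_singleton] at h
              subst h
              exact hce
          rw [hstep, ih (l ++ [(c, [r])]) hnd' hne']
          -- rewrite the RHS: r survives the key filter, then gb peels the c-group off
          have hkeep : (!((l.map Prod.fst).contains ((pvGet r "cpf_raw").getD ""))) = true := by
            rw [hcpf]
            simpa using hc
          have hrhs : (r :: t).filter (fun q => !((l.map Prod.fst).contains ((pvGet q "cpf_raw").getD "")))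
              = r :: t.filter (fun q => !((l.map Prod.fst).contains ((pvGet q "cpf_raw").getD ""))) := by
            rw [List.filter_cons, hkeep]
            simp
          rw [hrhs, gb_cons]
          simp only [hcpf, if_neg hce]
          -- align the three pieces
          rw [List.map_append, List.append_assoc]
          congr 1
          · apply List.map_congr_left
            intro p hp
            have hf : (pvGet r "cpf_raw" == some p.1) = false := by
              rw [hcpf]
              have : c ≠ p.1 := fun h => hc (h ▸ List.mem_map_of_mem hp)
              simpa using this
            rw [List.filter_cons, hf]
            simp
          · -- the new group and the recursive tail
            have hgrp : (r :: List.filter (fun q => !((l.map Prod.fst).contains ((pvGet q "cpf_raw").getD ""))) t).filter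
                (fun q => pvGet q "cpf_raw" == some c)
                = r :: t.filter (fun q => pvGet q "cpf_raw" == some c) := by
              rw [List.filter_cons]
              have : (pvGet r "cpf_raw" == some c) = true := by rw [hcpf]; simp
              rw [this]
              simp only [if_pos]
              rw [List.filter_filter]
              congr 1
              apply List.filter_congr
              intro q hq
              cases hqc : (pvGet q "cpf_raw" == some c) with
              | false => simp
              | true =>
                have hqs : pvGet q "cpf_raw" = some c := by
                  cases hq2 : pvGet q "cpf_raw" with
                  | none => rw [hq2] at hqc; cases hqc
                  | some s =>
                    rw [hq2] at hqc
                    simp only [Option.some_beq_some, beq_iff_eq] at hqc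
                    rw [hqc]
                rw [hqs]
                simpa using hc
            have htail : (List.filter (fun q => !((l.map Prod.fst).contains ((pvGet q "cpf_raw").getD ""))) t).filter
                (fun q => !(pvGet q "cpf_raw" == some c))
                = t.filter (fun q => !(((l ++ [(c, [r])]).map Prod.fst).contains ((pvGet q "cpf_raw").getD ""))) := by
              rw [List.filter_filter]
              apply List.filter_congr
              intro q hq
              rw [cpf_match_eq c hce q]
              simp only [List.map_append, List.map_cons, List.map_nil]
              rw [List.contains_append]
              cases h1 : (l.map Prod.fst).contains ((pvGet q "cpf_raw").getD "") <;>
                cases h2 : (((pvGet q "cpf_raw").getD "") == c) <;>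
                  simp <;>
                    first
                      | exact beq_eq_false_iff_ne.mp h2
                      | exact beq_iff_eq.mp h2
            rw [hgrp, htail]
            simp
-- B's extraction loop computes exactly the picks of gb's groups
theorem dedup_rec_eq_gb_aux (n : Nat) :
    ∀ (w : List (List (String × String))), w.length ≤ n →
    pvDedupRec (w.filter (fun r =>
      match pvGet r "cpf_raw" with | none => false | some c => c != ""))
      = (gb w).map (fun p =>
          if p.2.length = 1 then p.2.headD []
          else (PySem.List.max? p.2 pvCid).getD []) := by
  induction n with
  | zero =>
    intro w hw
    rw [List.eq_nil_of_length_eq_zero (Nat.le_zero.mp hw)]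
    rw [gb_nil]
    rw [show (List.filter _ ([] : List (List (String × String)))) = [] from rfl]
    rw [pvDedupRec]
    rfl
  | succ n ih =>
    intro w hw
    cases w with
    | nil =>
      rw [gb_nil]
      rw [show (List.filter _ ([] : List (List (String × String)))) = [] from rfl]
      rw [pvDedupRec]
      rfl
    | cons r t =>
      simp only [List.length_cons, Nat.succ_le_succ_iff] at hw
      rw [gb_cons]
      cases hcpf : pvGet r "cpf_raw" with
      | none =>
        have hdrop : (r :: t).filter (fun r =>
            match pvGet r "cpf_raw" with | none => false | some c => c != "")
            = t.filter (fun r =>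
            match pvGet r "cpf_raw" with | none => false | some c => c != "") := by
          rw [List.filter_cons]
          simp [hcpf]
        rw [hdrop]
        exact ih t hw
      | some c =>
        by_cases hce : c = ""
        · subst hce
          have hdrop : (r :: t).filter (fun r =>
              match pvGet r "cpf_raw" with | none => false | some c => c != "")
              = t.filter (fun r =>
              match pvGet r "cpf_raw" with | none => false | some c => c != "") := by
            rw [List.filter_cons]
            simp [hcpf]
          rw [hdrop]
          exact ih t hw
        · have hkeep : (r :: t).filter (fun r =>
              match pvGet r "cpf_raw" with | none => false | some c => c != "")
              = r :: t.filter (fun r =>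
              match pvGet r "cpf_raw" with | none => false | some c => c != "") := by
            rw [List.filter_cons]
            simp [hcpf, bne_iff_ne.mpr hce]
          rw [hkeep, pvDedupRec]
          simp only [hcpf, if_neg hce, List.map_cons]
          have hgrp : (r :: t.filter (fun r =>
              match pvGet r "cpf_raw" with | none => false | some c => c != "")).filter
                (fun q => pvGet q "cpf_raw" == some c)
              = r :: t.filter (fun q => pvGet q "cpf_raw" == some c) := by
            rw [List.filter_cons]
            have hr : (pvGet r "cpf_raw" == some c) = true := by rw [hcpf]; simp
            simp only [hr, if_pos]
            congr 1
            · rw [List.filter_filter]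
              apply List.filter_congr
              intro q hq
              cases hqc : (pvGet q "cpf_raw" == some c) with
              | false => simp
              | true =>
                have hqs : pvGet q "cpf_raw" = some c := by
                  cases hq2 : pvGet q "cpf_raw" with
                  | none => rw [hq2] at hqc; cases hqc
                  | some s =>
                    rw [hq2] at hqc
                    simp only [Option.some_beq_some, beq_iff_eq] at hqc
                    rw [hqc]
                simp [hqs, bne_iff_ne.mpr hce]
          have htail : (r :: t.filter (fun r =>
              match pvGet r "cpf_raw" with | none => false | some c => c != "")).filter
                (fun q => pvGet q "cpf_raw" != some c)
              = (t.filter (fun q => !(pvGet q "cpf_raw" == some c))).filter (fun r =>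
                match pvGet r "cpf_raw" with | none => false | some c => c != "") := by
            rw [List.filter_cons]
            have hr : (pvGet r "cpf_raw" != some c) = false := by rw [hcpf]; simp
            simp only [hr, Bool.false_eq_true, if_false]
            rw [List.filter_filter, List.filter_filter]
            apply List.filter_congr
            intro q hq
            cases hq1 : (pvGet q "cpf_raw" == some c) <;>
              cases hq2 : (match pvGet q "cpf_raw" with | none => false | some c => c != "") <;>
                simp [bne, hq1]
          rw [hgrp, htail]
          have hrec := ih (t.filter (fun q => !(pvGet q "cpf_raw" == some c)))
            (le_trans (List.length_filter_le _ _) hw)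
          rw [hrec]
          have h3 : List.filter (fun q => pvGet q "cpf_raw" == some c) (r :: t)
              = r :: t.filter (fun q => pvGet q "cpf_raw" == some c) := by
            rw [List.filter_cons]
            have hr : (pvGet r "cpf_raw" == some c) = true := by rw [hcpf]; simp
            simp [hr]
          rw [h3]

theorem dedup_rec_eq_gb (w : List (List (String × String))) :
    pvDedupRec (w.filter (fun r =>
      match pvGet r "cpf_raw" with | none => false | some c => c != ""))
      = (gb w).map (fun p =>
          if p.2.length = 1 then p.2.headD []
          else (PySem.List.max? p.2 pvCid).getD []) :=
  dedup_rec_eq_gb_aux w.length w (le_refl _)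

-- ===== VERDICT (by name: the statement is the Claim_ definition above) =====
theorem deduplicate_results_spec : Claim_equal_deduplicate_results := by
  intro results _ _
  show deduplicate_results results = deduplicate_results_alt results
  have h := loop_invariant results [] [] (by simp) (by simp)
  simp only [List.map_nil] at h
  simp only [deduplicate_results, deduplicate_results_alt]
  rw [show (PySem.Dict.empty : PySem.Dict String (List (String × String))) = PySem.Dict.mk [] from rfl]
  rw [h, fold_split]
  have hitems := items_gfold results [] (by simp) (by simp)
  simp only [List.map_nil, List.contains_nil, Bool.not_false, List.filter_true, List.nil_append] at hitems
  rw [hitems]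
  rw [dedup_rec_eq_gb]
  simp only [PySem.Dict.values, List.nil_append, List.map_map]
  congr 1
  · apply List.map_congr_left
    intro p hp
    have hpn := gb_ne_nil results p hp
    by_cases hl : p.2.length = 1
    · obtain ⟨x, hx⟩ := List.length_eq_one_iff.mp hl
      simp [Function.comp, pvRed', pvRed, hx, PySem.List.max?]
    · simp [Function.comp, pvRed', pvRed, hl]
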